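-- pv_equiv track=rewrite | github.com/pypi-data/pypi-mirror-246 | packages/pynimcodec/pynimcodec-0.2.0-py3-none-any.whl/pynimcodec/nimo/fields/helpers.py | optimal_bits
-- ===== SOURCE A (Python) =====
-- import math
--
-- def optimal_bits(value_range: 'tuple[int, int]') -> int:
--     """Returns the optimal number of bits for encoding a specified range.
--
--     Args:
--         value_range: A tuple with the minimum and maximum values.
--
--     Returns:
--         The number of bits to optimally encode the value.
--
--     Raises:
--         ValueError if the
--
--     """
--     if (not isinstance(value_range, tuple) or
--         len(value_range) != 2 or
--         not all(isinstance(x, int) for x in value_range) or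
--         value_range[0] >= value_range[1]):
--         #: non-compliant
--         raise ValueError('value_range must be of form (min, max)')
--     total_range = value_range[1] - value_range[0]
--     total_range += 1 if value_range[0] == 0 else 0
--     return max(1, math.ceil(math.log2(total_range)))
-- ===== SOURCE B (Python) =====
-- def optimal_bits(value_range: 'tuple[int, int]') -> int:
--     """Returns the optimal number of bits for encoding a specified range."""
--     if (not isinstance(value_range, tuple) or
--         len(value_range) != 2 or
--         not all(isinstance(x, int) for x in value_range) or
--         value_range[0] >= value_range[1]):
--         raise ValueError('value_range must be of form (min, max)')
--     lo, hi = value_range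
--     total_range = hi - lo + (1 if lo == 0 else 0)
--     bits, capacity = 1, 2
--     while capacity < total_range:
--         capacity *= 2
--         bits += 1
--     return bits
-- ===== Notes on version B (the rewrite author's own statement) =====
-- stated objective: alternative
-- what changed: Replaces the floating-point closed form max(1, ceil(log2(total_range))) with an integer doubling loop that counts how many bits are needed until the capacity 2**bits covers the range, dropping the math import.
import Mathlib
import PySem

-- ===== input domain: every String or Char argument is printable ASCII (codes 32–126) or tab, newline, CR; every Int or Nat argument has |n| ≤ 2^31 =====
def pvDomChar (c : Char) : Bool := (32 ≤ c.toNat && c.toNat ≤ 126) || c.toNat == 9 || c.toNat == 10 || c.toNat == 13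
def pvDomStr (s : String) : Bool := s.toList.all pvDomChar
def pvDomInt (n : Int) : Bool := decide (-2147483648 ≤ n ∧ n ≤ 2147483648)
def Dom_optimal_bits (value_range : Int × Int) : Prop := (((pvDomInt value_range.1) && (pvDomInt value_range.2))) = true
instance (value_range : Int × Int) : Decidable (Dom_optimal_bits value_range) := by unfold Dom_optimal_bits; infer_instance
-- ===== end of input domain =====

-- B replaces A's floating-point max(1, ceil(log2 range)) with an integer doubling loop; return value only.
-- ===== PORT A =====
-- 'math.ceil(math.log2 n)' is ported as Nat.clog 2 n: exact on the admitted domain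
-- (within Dom, total_range ≤ 2^32 + 1, where the float log2/ceil computation is exact).
def optimal_bits (value_range : Int × Int) : Int :=
  let total_range := value_range.2 - value_range.1
  let total_range := total_range + (if value_range.1 = 0 then 1 else 0)
  max 1 (Nat.clog 2 total_range.toNat : Int)

-- ===== PORT B =====
-- the while loop, with fuel only to make the recursion total (n.toNat steps always suffice)
def obLoop : Nat → Int → Int → Int → Int
  | 0, _, _, bits => bits
  | f + 1, n, capacity, bits =>
    if capacity < n then obLoop f n (2 * capacity) (bits + 1) else bits

def optimal_bits_alt (value_range : Int × Int) : Int :=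
  let total_range := value_range.2 - value_range.1 + (if value_range.1 = 0 then 1 else 0)
  obLoop total_range.toNat total_range 2 1

-- ===== PRECONDITION & SPEC =====
-- A raises ValueError when min >= max; exactly those inputs are excluded.
def Pre_optimal_bits (value_range : Int × Int) : Prop := value_range.1 < value_range.2
instance (value_range : Int × Int) : Decidable (Pre_optimal_bits value_range) := by
  unfold Pre_optimal_bits; infer_instance
def pvWitness_optimal_bits : (Int × Int) := (0, 5)
def Spec_optimal_bits (value_range : Int × Int) (out : Int) : Prop := out = optimal_bits_alt value_range
instance (value_range : Int × Int) (out : Int) : Decidable (Spec_optimal_bits value_range out) := by unfold Spec_optimal_bits; infer_instance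

-- ===== CLAIM (what is proved, stated in full; the proofs are below) =====
def Claim_equal_optimal_bits : Prop := ∀ (value_range : Int × Int), Dom_optimal_bits value_range → Pre_optimal_bits value_range → Spec_optimal_bits value_range (optimal_bits value_range)

-- ===== LEMMAS AND PROOFS =====

-- The doubling loop, started at capacity 2^b with counter b and enough fuel,
-- computes max b (ceil(log2 n)).
theorem obLoop_eq (f : Nat) : ∀ (n : Int) (b : Nat), 1 ≤ n → (n - 2 ^ b).toNat ≤ f →
    obLoop f n ((2 : Int) ^ b) (b : Int) = max (b : Int) ((Nat.clog 2 n.toNat : Nat) : Int) := by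
  induction f with
  | zero =>
    intro n b hn hf
    have hcap : n ≤ 2 ^ b := by omega
    have hclog : Nat.clog 2 n.toNat ≤ b := by
      apply (Nat.clog_le_iff_le_pow (by norm_num)).mpr
      have : (2 : Int) ^ b = ((2 ^ b : Nat) : Int) := by push_cast; ring
      omega
    simp [obLoop]
    omega
  | succ f ih =>
    intro n b hn hf
    have hpow : (1 : Int) ≤ 2 ^ b := one_le_pow₀ (by norm_num)
    by_cases h : (2 : Int) ^ b < n
    · have hstep : obLoop (f + 1) n ((2 : Int) ^ b) (b : Int)
          = obLoop f n ((2 : Int) ^ (b + 1)) ((b + 1 : Nat) : Int) := by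
        simp [obLoop, h, pow_succ]
        ring_nf
      rw [hstep, ih n (b + 1) hn (by
        have : (1 : Int) ≤ 2 ^ b := hpow
        rw [pow_succ]
        omega)]
      have hclog : (b : Nat) + 1 ≤ Nat.clog 2 n.toNat := by
        by_contra hc
        have hle : Nat.clog 2 n.toNat ≤ b := by omega
        have := (Nat.clog_le_iff_le_pow (show 1 < 2 by norm_num)).mp hle
        have hcast : ((2 ^ b : Nat) : Int) = (2 : Int) ^ b := by push_cast; ring
        omega
      omega
    · have hcap : n ≤ 2 ^ b := by omega
      have hclog : Nat.clog 2 n.toNat ≤ b := by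
        apply (Nat.clog_le_iff_le_pow (by norm_num)).mpr
        have : (2 : Int) ^ b = ((2 ^ b : Nat) : Int) := by push_cast; ring
        omega
      simp [obLoop, h]
      omega

-- ===== VERDICT (by name: the statement is the Claim_ definition above) =====
theorem optimal_bits_spec : Claim_equal_optimal_bits := by
  intro ⟨lo, hi⟩ _ hpre
  unfold Pre_optimal_bits at hpre
  unfold Spec_optimal_bits optimal_bits optimal_bits_alt
  simp only []
  set n : Int := hi - lo + (if lo = 0 then 1 else 0) with hn
  have hn1 : 1 ≤ n := by rw [hn]; split_ifs <;> omega
  have h2 : (2 : Int) = 2 ^ (1 : Nat) := by norm_num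
  have := obLoop_eq n.toNat n 1 hn1 (by omega)
  rw [h2]
  simpa using this.symm
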